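-- pv_equiv track=rewrite | github.com/relomy/dk_results | src/dk_results/services/snapshot_v3/collector.py | _merge_unique_name_to_player_keys
-- ===== SOURCE A (Python) =====
-- def _merge_unique_name_to_player_keys(
--     primary: dict[str, str],
--     secondary: dict[str, str],
-- ) -> dict[str, str]:
--     merged = dict(primary)
--     for name_key, key in secondary.items():
--         existing = merged.get(name_key)
--         if existing is None:
--             merged[name_key] = key
--             continue
--         if existing != key:
--             merged.pop(name_key, None)
--     return merged
-- ===== SOURCE B (Python) =====
-- def _merge_unique_name_to_player_keys(
--     primary: dict[str, str],
--     secondary: dict[str, str],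
-- ) -> dict[str, str]:
--     union = {**primary, **secondary}
--     return {
--         name_key: key
--         for name_key, key in union.items()
--         if primary.get(name_key, key) == secondary.get(name_key, key)
--     }
-- ===== Notes on version B (the rewrite author's own statement) =====
-- stated objective: idiomatic
-- what changed: B first forms the full dict union {**primary, **secondary} and then filters out conflicting keys with one dict comprehension, instead of A's copy-then-mutate loop with conditional inserts and pops.
import Mathlib
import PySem

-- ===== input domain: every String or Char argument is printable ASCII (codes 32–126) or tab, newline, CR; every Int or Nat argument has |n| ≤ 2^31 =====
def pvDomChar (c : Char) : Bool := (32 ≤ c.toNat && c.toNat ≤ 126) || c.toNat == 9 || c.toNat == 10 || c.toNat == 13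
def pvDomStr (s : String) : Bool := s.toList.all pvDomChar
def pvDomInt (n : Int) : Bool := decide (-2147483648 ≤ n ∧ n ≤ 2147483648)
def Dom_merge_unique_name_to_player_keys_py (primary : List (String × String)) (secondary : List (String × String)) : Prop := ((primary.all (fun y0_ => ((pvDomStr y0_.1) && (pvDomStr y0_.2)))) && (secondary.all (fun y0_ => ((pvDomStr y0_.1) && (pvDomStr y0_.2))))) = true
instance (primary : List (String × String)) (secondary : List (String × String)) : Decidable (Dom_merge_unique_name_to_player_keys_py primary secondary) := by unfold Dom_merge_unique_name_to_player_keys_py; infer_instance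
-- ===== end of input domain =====

-- B forms the full dict union {**primary, **secondary} and then removes conflicting
-- keys with one filtering dict comprehension, instead of A's copy-then-mutate loop
-- with conditional inserts and pops (objective: idiomatic; same cost).

-- ===== PORT A =====
-- one iteration of A's loop body over secondary.items()
def mergeStepA (m : PySem.Dict String String) (q : String × String) : PySem.Dict String String :=
  match m.get? q.1 with                       -- existing = merged.get(name_key)
  | none => m.insert q.1 q.2                  -- merged[name_key] = key; continue
  | some existing =>
      if existing ≠ q.2 then m.erase q.1      -- merged.pop(name_key, None)
      else m

def merge_unique_name_to_player_keys_py (primary : List (String × String)) (secondary : List (String × String)) : List (String × String) :=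
  let merged := PySem.Dict.ofList primary     -- merged = dict(primary)
  ((PySem.Dict.ofList secondary).items.foldl mergeStepA merged).items

-- ===== PORT B =====
def merge_unique_name_to_player_keys_py_alt (primary : List (String × String)) (secondary : List (String × String)) : List (String × String) :=
  let P := PySem.Dict.ofList primary
  let S := PySem.Dict.ofList secondary
  -- union = {**primary, **secondary}
  let union := S.items.foldl (fun m q => m.insert q.1 q.2) P
  -- {k: v for k, v in union.items() if primary.get(k, v) == secondary.get(k, v)}
  union.items.filter (fun p => P.getD p.1 p.2 == S.getD p.1 p.2)

-- ===== PRECONDITION & SPEC =====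
def Spec_merge_unique_name_to_player_keys_py (primary : List (String × String)) (secondary : List (String × String)) (out : List (String × String)) : Prop := out = merge_unique_name_to_player_keys_py_alt primary secondary
instance (primary : List (String × String)) (secondary : List (String × String)) (out : List (String × String)) : Decidable (Spec_merge_unique_name_to_player_keys_py primary secondary out) := by unfold Spec_merge_unique_name_to_player_keys_py; infer_instance

-- ===== CLAIM (what is proved, stated in full; the proofs are below) =====
def Claim_equal_merge_unique_name_to_player_keys_py : Prop := ∀ (primary : List (String × String)) (secondary : List (String × String)), Dom_merge_unique_name_to_player_keys_py primary secondary → Spec_merge_unique_name_to_player_keys_py primary secondary (merge_unique_name_to_player_keys_py primary secondary)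

-- ===== LEMMAS AND PROOFS =====

-- 'this entry of m conflicts with some entry of l' (same key, different value)
def confB (l : List (String × String)) (p : String × String) : Bool :=
  l.any (fun q => q.1 == p.1 && q.2 != p.2)

-- 'the value of key p.1 in l overrides p' (dict-union update on one entry)
def updB (l : List (String × String)) (p : String × String) : String × String :=
  match l.find? (fun q => q.1 == p.1) with
  | some q => (p.1, q.2)
  | none => p

lemma erase_items (m : PySem.Dict String String) (k : String) :
    (m.erase k).items = m.items.filter (fun p => !(p.1 == k)) := rfl

lemma contains_eq_any (m : PySem.Dict String String) (k : String) :
    m.contains k = m.items.any (fun p => p.1 == k) := rfl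

lemma erase_contains (m : PySem.Dict String String) (k x : String) (h : x ≠ k) :
    (m.erase k).contains x = m.contains x := by
  simp only [contains_eq_any, erase_items, List.any_filter]
  refine congrArg (List.any m.items) (funext fun p => ?_)
  cases hpx : p.1 == x
  · simp
  · have : p.1 = x := by simpa using hpx
    simp [this, h]

lemma nodup_keys_erase (m : PySem.Dict String String) (k : String) (h : m.keys.Nodup) :
    (m.erase k).keys.Nodup := by
  have hs : (m.erase k).keys.Sublist m.keys := by
    simp only [PySem.Dict.keys, erase_items]
    exact List.Sublist.map _ List.filter_sublist
  exact h.sublist hs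

-- A's loop, characterised: surviving old entries, then fresh entries of l
lemma foldA_items (l : List (String × String)) :
    ∀ (m : PySem.Dict String String), m.keys.Nodup → (l.map Prod.fst).Nodup →
    (l.foldl mergeStepA m).items
      = m.items.filter (fun p => !confB l p) ++ l.filter (fun q => !m.contains q.1) := by
  induction l with
  | nil => intro m _ _; simp [confB]
  | cons q t ih =>
    intro m hm hl
    rw [List.map_cons] at hl
    have ht : (t.map Prod.fst).Nodup := hl.of_cons
    have hq1 : q.1 ∉ t.map Prod.fst := (List.nodup_cons.mp hl).1
    have hconf_q : confB t q = false := by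
      simp only [confB, List.any_eq_false]
      intro p hp
      have : p.1 ≠ q.1 := fun h => hq1 (h ▸ List.mem_map_of_mem hp)
      simp [this]
    simp only [List.foldl_cons]
    cases hg : m.get? q.1 with
    | none =>
      have hc : m.contains q.1 = false := by
        have := (PySem.Dict.get?_eq_none_iff_contains (d := m) (k := q.1)).mp hg
        exact this
      have hkey : ∀ p ∈ m.items, p.1 ≠ q.1 := by
        intro p hp h
        have : m.contains q.1 = true := by
          simp only [contains_eq_any, List.any_eq_true]
          exact ⟨p, hp, by simp [h]⟩
        simp [this] at hc
      have hstep : mergeStepA m q = m.insert q.1 q.2 := by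
        simp [mergeStepA, hg]
      rw [hstep, ih (m.insert q.1 q.2) (PySem.Dict.nodup_keys_insert m q.1 q.2 hm) ht]
      rw [PySem.Dict.items_insert, if_neg (by simp [hc])]
      rw [List.filter_append]
      have h1 : (m.items.filter (fun p => !confB t p))
          = m.items.filter (fun p => !confB (q :: t) p) := by
        refine List.filter_congr (fun p hp => ?_)
        have hne : p.1 ≠ q.1 := hkey p hp
        simp [confB, List.any_cons, Ne.symm hne]
      have h2 : (t.filter (fun q' => !(m.insert q.1 q.2).contains q'.1))
          = t.filter (fun q' => !m.contains q'.1) := by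
        refine List.filter_congr (fun q' hq' => ?_)
        have hne : q'.1 ≠ q.1 := fun h => hq1 (h ▸ List.mem_map_of_mem hq')
        rw [PySem.Dict.contains_insert]
        simp [hne]
      rw [h1, h2]
      simp [hconf_q, hc, List.append_assoc]
    | some e =>
      have hcont : m.contains q.1 = true := by
        rw [PySem.Dict.contains_eq_isSome_get?, hg]; rfl
      by_cases he : e = q.2
      · have hstep : mergeStepA m q = m := by
          simp [mergeStepA, hg, he]
        rw [hstep, ih m hm ht]
        have h1 : (m.items.filter (fun p => !confB t p))
            = m.items.filter (fun p => !confB (q :: t) p) := by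
          refine List.filter_congr (fun p hp => ?_)
          by_cases hpq : p.1 = q.1
          · have : m.get? p.1 = some p.2 := PySem.Dict.get?_of_mem_items m hp hm
            rw [hpq, hg] at this
            have hpe : p.2 = q.2 := by rw [← he]; exact (Option.some.inj this).symm
            simp [confB, List.any_cons, hpe]
          · simp [confB, List.any_cons, Ne.symm hpq]
        rw [h1]
        simp [hcont]
      · have hstep : mergeStepA m q = m.erase q.1 := by
          simp [mergeStepA, hg, he]
        rw [hstep, ih (m.erase q.1) (nodup_keys_erase m q.1 hm) ht]
        have h1 : ((m.erase q.1).items.filter (fun p => !confB t p))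
            = m.items.filter (fun p => !confB (q :: t) p) := by
          rw [erase_items, List.filter_filter]
          refine List.filter_congr (fun p hp => ?_)
          by_cases hpq : p.1 = q.1
          · have : m.get? p.1 = some p.2 := PySem.Dict.get?_of_mem_items m hp hm
            rw [hpq, hg] at this
            have hpe : p.2 = e := (Option.some.inj this).symm
            have hpe2 : p.2 ≠ q.2 := by rw [hpe]; exact he
            simp [confB, List.any_cons, hpq]
            exact fun h => (hpe2 h.symm).elim
          · have h1 : (p.1 == q.1) = false := by simpa using hpq
            have h2 : (q.1 == p.1) = false := by simpa using Ne.symm hpq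
            simp [confB, List.any_cons, h1, h2, Bool.and_comm]
        have h2 : (t.filter (fun q' => !(m.erase q.1).contains q'.1))
            = t.filter (fun q' => !m.contains q'.1) := by
          refine List.filter_congr (fun q' hq' => ?_)
          have hne : q'.1 ≠ q.1 := fun h => hq1 (h ▸ List.mem_map_of_mem hq')
          rw [erase_contains m q.1 q'.1 hne]
        rw [h1, h2]
        simp [hcont]

-- B's union fold, characterised: old entries value-updated, then fresh entries of l
lemma foldU_items (l : List (String × String)) :
    ∀ (d : PySem.Dict String String), d.keys.Nodup → (l.map Prod.fst).Nodup →
    (l.foldl (fun m q => m.insert q.1 q.2) d).items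
      = d.items.map (updB l) ++ l.filter (fun q => !d.contains q.1) := by
  induction l with
  | nil =>
    intro d _ _
    have : updB [] = id := funext fun p => rfl
    simp [this]
  | cons q t ih =>
    intro d hd hl
    rw [List.map_cons] at hl
    have ht : (t.map Prod.fst).Nodup := hl.of_cons
    have hq1 : q.1 ∉ t.map Prod.fst := (List.nodup_cons.mp hl).1
    have hqt : t.find? (fun q' => q'.1 == q.1) = none := by
      rw [List.find?_eq_none]
      intro q' hq'
      have : q'.1 ≠ q.1 := fun h => hq1 (h ▸ List.mem_map_of_mem hq')
      simp [this]
    simp only [List.foldl_cons]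
    rw [ih (d.insert q.1 q.2) (PySem.Dict.nodup_keys_insert d q.1 q.2 hd) ht]
    have hfilt : (t.filter (fun q' => !(d.insert q.1 q.2).contains q'.1))
        = t.filter (fun q' => !d.contains q'.1) := by
      refine List.filter_congr (fun q' hq' => ?_)
      have hne : q'.1 ≠ q.1 := fun h => hq1 (h ▸ List.mem_map_of_mem hq')
      rw [PySem.Dict.contains_insert]
      simp [hne]
    cases hc : d.contains q.1 with
    | true =>
      rw [PySem.Dict.items_insert, if_pos hc, hfilt]
      have hmap : ((d.items.map (fun p => if p.1 == q.1 then (q.1, q.2) else p)).map (updB t))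
          = d.items.map (updB (q :: t)) := by
        rw [List.map_map]
        refine List.map_congr_left (fun p _ => ?_)
        by_cases hpq : p.1 = q.1
        · simp only [Function.comp, hpq, beq_self_eq_true, if_pos]
          simp [updB, hqt, hpq]
        · have hb : (p.1 == q.1) = false := by simpa using hpq
          have hb2 : (q.1 == p.1) = false := by simpa using (Ne.symm hpq)
          simp only [Function.comp, hb, if_neg, Bool.false_eq_true, not_false_iff]
          simp [updB, hb2]
      rw [hmap]
      simp [hc]
    | false =>
      rw [PySem.Dict.items_insert, if_neg (by simp [hc]), hfilt]
      have hkey : ∀ p ∈ d.items, p.1 ≠ q.1 := by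
        intro p hp h
        have : d.contains q.1 = true := by
          simp only [contains_eq_any, List.any_eq_true]
          exact ⟨p, hp, by simp [h]⟩
        simp [this] at hc
      rw [List.map_append]
      have hmap : (d.items.map (updB t)) = d.items.map (updB (q :: t)) := by
        refine List.map_congr_left (fun p hp => ?_)
        have hb2 : (q.1 == p.1) = false := by simpa using (Ne.symm (hkey p hp))
        simp [updB, hb2]
      have hself : updB t q = q := by simp [updB, hqt]
      rw [hmap]
      simp [hc, hself, List.append_assoc]

-- with unique keys in l, updB reads off the dict lookup
lemma updB_get? (S : PySem.Dict String String) (h : S.keys.Nodup) (p : String × String) :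
    updB S.items p = match S.get? p.1 with
      | some v => (p.1, v)
      | none => p := by
  unfold updB
  cases hf : S.items.find? (fun q => q.1 == p.1) with
  | none =>
    have hcf : S.contains p.1 = false := by
      rw [List.find?_eq_none] at hf
      simp only [contains_eq_any, List.any_eq_false]
      intro q hq
      simpa using hf q hq
    have : S.get? p.1 = none := (PySem.Dict.get?_eq_none_iff_contains S p.1).mpr hcf
    simp [this]
  | some q =>
    have hq1 : q.1 = p.1 := by simpa using List.find?_some hf
    have hmem : q ∈ S.items := List.mem_of_find?_eq_some hf
    have : S.get? q.1 = some q.2 := PySem.Dict.get?_of_mem_items S hmem h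
    rw [hq1] at this
    simp [this]

-- with unique keys, conflict with some entry of S.items is a lookup disagreement
lemma confB_get? (S : PySem.Dict String String) (h : S.keys.Nodup) (p : String × String) :
    confB S.items p = match S.get? p.1 with
      | some v => v != p.2
      | none => false := by
  cases hg : S.get? p.1 with
  | none =>
    have : ∀ q ∈ S.items, ¬(q.1 == p.1 && q.2 != p.2) = true := by
      intro q hq hx
      have hqp : q.1 = p.1 := by
        have := (Bool.and_eq_true ..).mp hx
        simpa using this.1
      have : S.get? q.1 = some q.2 := PySem.Dict.get?_of_mem_items S hq h
      rw [hqp, hg] at this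
      simp at this
    simp only [confB]
    simp [List.any_eq_false.mpr this]
  | some v =>
    have hv : (p.1, v) ∈ S.items := PySem.Dict.mem_items_of_get?_eq_some S hg
    simp only [confB]
    cases hvp : v == p.2
    · have hne : v ≠ p.2 := by simpa using hvp
      have : S.items.any (fun q => q.1 == p.1 && q.2 != p.2) = true := by
        rw [List.any_eq_true]
        exact ⟨(p.1, v), hv, by simp [hne]⟩
      simp [this, hne]
    · have heq : v = p.2 := by simpa using hvp
      have : ∀ q ∈ S.items, ¬(q.1 == p.1 && q.2 != p.2) = true := by
        intro q hq hx
        have h1 := (Bool.and_eq_true ..).mp hx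
        have hqp : q.1 = p.1 := by simpa using h1.1
        have hq2 : q.2 ≠ p.2 := by simpa using h1.2
        have : S.get? q.1 = some q.2 := PySem.Dict.get?_of_mem_items S hq h
        rw [hqp, hg] at this
        exact hq2 (by rw [← Option.some.inj this, heq])
      simp [List.any_eq_false.mpr this, heq]

-- filtering a mapped list = mapping the list filtered through the composition
lemma filter_of_map (l : List (String × String)) (f : String × String → String × String)
    (g : String × String → Bool) :
    (l.map f).filter g = (l.filter (fun a => g (f a))).map f := by
  induction l with
  | nil => rfl
  | cons a t ih =>
    simp only [List.map_cons, List.filter_cons]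
    cases g (f a) <;> simp [ih]

-- ===== VERDICT (by name: the statement is the Claim_ definition above) =====
theorem merge_unique_name_to_player_keys_py_spec : Claim_equal_merge_unique_name_to_player_keys_py := by
  intro primary secondary _
  unfold Spec_merge_unique_name_to_player_keys_py
  unfold merge_unique_name_to_player_keys_py merge_unique_name_to_player_keys_py_alt
  dsimp only
  set P := PySem.Dict.ofList primary with hP
  set S := PySem.Dict.ofList secondary with hS
  have hPn : P.keys.Nodup := PySem.Dict.nodup_keys_ofList primary
  have hSn : S.keys.Nodup := PySem.Dict.nodup_keys_ofList secondary
  have hPk : (P.items.map Prod.fst).Nodup := hPn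
  have hSk : (S.items.map Prod.fst).Nodup := hSn
  -- A side
  rw [foldA_items S.items P hPn hSk]
  -- B side: union, then filter over the two blocks
  rw [foldU_items S.items P hPn hSk, List.filter_append]
  -- fresh block: every secondary-only entry passes the filter
  have hfresh : (S.items.filter (fun q => !P.contains q.1)).filter
        (fun p => P.getD p.1 p.2 == S.getD p.1 p.2)
      = S.items.filter (fun q => !P.contains q.1) := by
    rw [List.filter_eq_self]
    intro q hq
    have hqS : q ∈ S.items := List.mem_of_mem_filter hq
    have hqP : P.contains q.1 = false := by
      have := List.of_mem_filter hq
      simpa using this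
    have h1 : P.getD q.1 q.2 = q.2 := PySem.Dict.getD_of_not_contains P q.2 hqP
    have h2 : S.getD q.1 q.2 = q.2 := PySem.Dict.getD_of_mem_items S hqS hSn q.2
    simp [h1, h2]
  -- updated primary block: the filter keeps exactly the non-conflicting entries, unchanged
  have hmapblock : ((P.items.map (updB S.items)).filter
        (fun p => P.getD p.1 p.2 == S.getD p.1 p.2))
      = P.items.filter (fun p => !confB S.items p) := by
    rw [filter_of_map]
    have hcond : P.items.filter
          (fun a => P.getD (updB S.items a).1 (updB S.items a).2
            == S.getD (updB S.items a).1 (updB S.items a).2)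
        = P.items.filter (fun p => !confB S.items p) := by
      refine List.filter_congr (fun p hp => ?_)
      have hPg : P.get? p.1 = some p.2 := PySem.Dict.get?_of_mem_items P hp hPn
      rw [updB_get? S hSn p, confB_get? S hSn p]
      cases hg : S.get? p.1 with
      | none =>
        have h1 : P.getD p.1 p.2 = p.2 := PySem.Dict.getD_of_get?_eq_some P p.2 hPg
        have h2 : S.getD p.1 p.2 = p.2 := PySem.Dict.getD_of_get?_eq_none S p.2 hg
        simp [h1, h2]
      | some v =>
        have h1 : P.getD p.1 v = p.2 := PySem.Dict.getD_of_get?_eq_some P v hPg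
        have h2 : S.getD p.1 v = v := PySem.Dict.getD_of_get?_eq_some S v hg
        simp only [h1, h2]
        cases hvp : v == p.2
        · have : (p.2 == v) = false := by
            have : v ≠ p.2 := by simpa using hvp
            simpa using Ne.symm this
          simp [this, by simpa using hvp]
        · have heq : v = p.2 := by simpa using hvp
          simp [heq]
    rw [hcond]
    have : ∀ p ∈ P.items.filter (fun p => !confB S.items p), updB S.items p = p := by
      intro p hpf
      have hp : p ∈ P.items := List.mem_of_mem_filter hpf
      have hnc : confB S.items p = false := by
        have := List.of_mem_filter hpf
        simpa using this
      rw [updB_get? S hSn p]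
      rw [confB_get? S hSn p] at hnc
      cases hg : S.get? p.1 with
      | none => simp
      | some v =>
        rw [hg] at hnc
        have hv : v = p.2 := by simpa using hnc
        simp [hv]
    calc (P.items.filter (fun p => !confB S.items p)).map (updB S.items)
        = (P.items.filter (fun p => !confB S.items p)).map id := List.map_congr_left this
      _ = _ := List.map_id _
  rw [hfresh, hmapblock]
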